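-- pv_equiv track=rewrite | github.com/Ruani-Filipe/HackathonFIAP | app/stride.py | infer_node_type
-- ===== SOURCE A (Python) =====
-- def infer_node_type(label: str | None) -> str:
--     """Infer a coarse component type from label text using keyword matching."""
--     t = (label or "").strip().lower()
--     if not t:
--         return "component"
--
--     # --- users / actors ---
--     if any(k in t for k in ["user", "usuário", "usuario", "customer", "cliente", "browser", "mobile", "frontend", "ui"]):
--         return "user"
--
--     # --- network / edge ---
--     if any(k in t for k in ["cdn", "cloudfront", "akamai"]):
--         return "cdn"
--     if any(k in t for k in ["waf", "firewall"]):
--         return "waf"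
--     if any(k in t for k in ["load balancer", "elb", "alb", "nlb", "ingress", "reverse proxy", "proxy"]):
--         return "load_balancer"
--     if any(k in t for k in ["dns", "route 53", "route53"]):
--         return "dns"
--
--     # --- api / gateway ---
--     if any(k in t for k in ["api gateway", "gateway", "endpoint", "rest", "graphql"]):
--         return "api_gateway"
--     if "api" in t:
--         return "api"
--
--     # --- compute / apps ---
--     if any(k in t for k in ["service", "microservice", "backend", "worker", "lambda", "function", "container", "pod"]):
--         return "service"
--     if any(k in t for k in ["server", "vm", "ec2", "instance", "app server", "web server", "nginx", "apache"]):
--         return "server"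
--
--     # --- data ---
--     if any(k in t for k in ["db", "database", "rds", "dynamodb", "postgres", "mysql", "sql server", "oracle", "mongo", "redis"]):
--         return "database"
--     if any(k in t for k in ["cache", "memcached"]):
--         return "cache"
--     if any(k in t for k in ["s3", "bucket", "storage", "blob", "files", "minio"]):
--         return "storage"
--
--     # --- messaging ---
--     if any(k in t for k in ["queue", "mq", "kafka", "sqs", "pubsub", "rabbit", "event", "topic", "stream"]):
--         return "queue"
--
--     # --- auth / identity ---
--     if any(k in t for k in ["auth", "oauth", "oidc", "sso", "iam", "identity", "cognito", "keycloak"]):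
--         return "identity"
--
--     # --- observability ---
--     if any(k in t for k in ["cloudtrail", "siem", "log", "logging", "monitor", "grafana", "prometheus"]):
--         return "observability"
--
--     return "component"
-- ===== SOURCE B (Python) =====
-- RULES = [
--     ("user", ("user", "usuário", "usuario", "customer", "cliente", "browser", "mobile", "frontend", "ui")),
--     ("cdn", ("cdn", "cloudfront", "akamai")),
--     ("waf", ("waf", "firewall")),
--     ("load_balancer", ("load balancer", "elb", "alb", "nlb", "ingress", "reverse proxy", "proxy")),
--     ("dns", ("dns", "route 53", "route53")),
--     ("api_gateway", ("api gateway", "gateway", "endpoint", "rest", "graphql")),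
--     ("api", ("api",)),
--     ("service", ("service", "microservice", "backend", "worker", "lambda", "function", "container", "pod")),
--     ("server", ("server", "vm", "ec2", "instance", "app server", "web server", "nginx", "apache")),
--     ("database", ("db", "database", "rds", "dynamodb", "postgres", "mysql", "sql server", "oracle", "mongo", "redis")),
--     ("cache", ("cache", "memcached")),
--     ("storage", ("s3", "bucket", "storage", "blob", "files", "minio")),
--     ("queue", ("queue", "mq", "kafka", "sqs", "pubsub", "rabbit", "event", "topic", "stream")),
--     ("identity", ("auth", "oauth", "oidc", "sso", "iam", "identity", "cognito", "keycloak")),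
--     ("observability", ("cloudtrail", "siem", "log", "logging", "monitor", "grafana", "prometheus")),
-- ]
--
-- TYPES = [ty for ty, _ in RULES]
-- KEYWORDS = [(kw, p) for p, (_ty, kws) in enumerate(RULES) for kw in kws]
--
--
-- def infer_node_type(label):
--     """Position-scan matcher: test every keyword as a prefix of every suffix of
--     the text, collect the priorities of all matching keywords, and return the
--     type with the smallest matched priority."""
--     t = (label or "").strip().lower()
--     if not t:
--         return "component"
--     prios = [p for kw, p in KEYWORDS if any(t.startswith(kw, i) for i in range(len(t)))]
--     return TYPES[min(prios)] if prios else "component"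
-- ===== Notes on version B (the rewrite author's own statement) =====
-- stated objective: alternative
-- what changed: Replaces A's 15-branch per-keyword substring if-chain by a position-scan matcher: B tests every keyword as a prefix of every suffix of the text, collects the priorities of all matching keywords, and returns the type with the smallest matched priority.
import Mathlib
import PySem

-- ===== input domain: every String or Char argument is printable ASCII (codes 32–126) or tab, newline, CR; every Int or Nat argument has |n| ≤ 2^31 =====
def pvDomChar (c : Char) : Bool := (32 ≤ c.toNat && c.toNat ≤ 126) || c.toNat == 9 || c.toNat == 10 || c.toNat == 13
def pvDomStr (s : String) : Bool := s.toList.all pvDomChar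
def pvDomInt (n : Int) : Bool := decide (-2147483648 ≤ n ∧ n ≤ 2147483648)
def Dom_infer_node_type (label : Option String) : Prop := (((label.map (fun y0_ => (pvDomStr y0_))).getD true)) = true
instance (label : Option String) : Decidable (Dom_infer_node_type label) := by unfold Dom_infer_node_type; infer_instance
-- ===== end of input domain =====

-- B replaces A's 15-branch substring if-chain by a position-scan matcher: it tests every keyword
-- as a prefix of every suffix of the text, collects the priorities of ALL matches and returns the
-- type of the smallest one (objective: alternative algorithm; same outputs on the whole domain).

-- ===== PORT A =====
def infer_node_type (label : Option String) : String :=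
  let t := PySem.Str.lower (PySem.Str.strip (label.getD ""))
  if t = "" then "component"
  else
  if (["user", "usuário", "usuario", "customer", "cliente", "browser", "mobile", "frontend", "ui"]).any (fun k => PySem.Str.isIn k t) then "user"
  else if (["cdn", "cloudfront", "akamai"]).any (fun k => PySem.Str.isIn k t) then "cdn"
  else if (["waf", "firewall"]).any (fun k => PySem.Str.isIn k t) then "waf"
  else if (["load balancer", "elb", "alb", "nlb", "ingress", "reverse proxy", "proxy"]).any (fun k => PySem.Str.isIn k t) then "load_balancer"
  else if (["dns", "route 53", "route53"]).any (fun k => PySem.Str.isIn k t) then "dns"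
  else if (["api gateway", "gateway", "endpoint", "rest", "graphql"]).any (fun k => PySem.Str.isIn k t) then "api_gateway"
  else if PySem.Str.isIn "api" t then "api"
  else if (["service", "microservice", "backend", "worker", "lambda", "function", "container", "pod"]).any (fun k => PySem.Str.isIn k t) then "service"
  else if (["server", "vm", "ec2", "instance", "app server", "web server", "nginx", "apache"]).any (fun k => PySem.Str.isIn k t) then "server"
  else if (["db", "database", "rds", "dynamodb", "postgres", "mysql", "sql server", "oracle", "mongo", "redis"]).any (fun k => PySem.Str.isIn k t) then "database"
  else if (["cache", "memcached"]).any (fun k => PySem.Str.isIn k t) then "cache"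
  else if (["s3", "bucket", "storage", "blob", "files", "minio"]).any (fun k => PySem.Str.isIn k t) then "storage"
  else if (["queue", "mq", "kafka", "sqs", "pubsub", "rabbit", "event", "topic", "stream"]).any (fun k => PySem.Str.isIn k t) then "queue"
  else if (["auth", "oauth", "oidc", "sso", "iam", "identity", "cognito", "keycloak"]).any (fun k => PySem.Str.isIn k t) then "identity"
  else if (["cloudtrail", "siem", "log", "logging", "monitor", "grafana", "prometheus"]).any (fun k => PySem.Str.isIn k t) then "observability"
  else "component"

-- ===== PORT B =====
def pvRules : List (String × List String) := [
  ("user", ["user", "usuário", "usuario", "customer", "cliente", "browser", "mobile", "frontend", "ui"]),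
  ("cdn", ["cdn", "cloudfront", "akamai"]),
  ("waf", ["waf", "firewall"]),
  ("load_balancer", ["load balancer", "elb", "alb", "nlb", "ingress", "reverse proxy", "proxy"]),
  ("dns", ["dns", "route 53", "route53"]),
  ("api_gateway", ["api gateway", "gateway", "endpoint", "rest", "graphql"]),
  ("api", ["api"]),
  ("service", ["service", "microservice", "backend", "worker", "lambda", "function", "container", "pod"]),
  ("server", ["server", "vm", "ec2", "instance", "app server", "web server", "nginx", "apache"]),
  ("database", ["db", "database", "rds", "dynamodb", "postgres", "mysql", "sql server", "oracle", "mongo", "redis"]),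
  ("cache", ["cache", "memcached"]),
  ("storage", ["s3", "bucket", "storage", "blob", "files", "minio"]),
  ("queue", ["queue", "mq", "kafka", "sqs", "pubsub", "rabbit", "event", "topic", "stream"]),
  ("identity", ["auth", "oauth", "oidc", "sso", "iam", "identity", "cognito", "keycloak"]),
  ("observability", ["cloudtrail", "siem", "log", "logging", "monitor", "grafana", "prometheus"])]

def pvTypes : List String := pvRules.map (fun r => r.1)

def pvKeywords : List (String × Int) :=
  (PySem.List.enumerate pvRules 0).flatMap (fun pr => pr.2.2.map (fun k => (k, pr.1)))

def infer_node_type_alt (label : Option String) : String :=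
  let t := PySem.Str.lower (PySem.Str.strip (label.getD ""))
  if t = "" then "component"
  else
    -- t.startswith(kw, i) with 0 ≤ i is exactly startswith of the slice t[i:] (hand port, exact)
    let prios := (pvKeywords.filter (fun kp =>
      (PySem.List.pyRange 0 (PySem.Str.len t) 1).any
        (fun i => PySem.Str.startswith (PySem.Str.slice t (some i) none) kp.1))).map (fun kp => kp.2)
    match PySem.List.min? prios (fun x => x) with
    | some p => (PySem.List.pyGet? pvTypes p).getD "component"  -- index is provably in range (0..14); the default is unreachable
    | none => "component"

-- ===== PRECONDITION & SPEC =====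
def Spec_infer_node_type (label : Option String) (out : String) : Prop := out = infer_node_type_alt label
instance (label : Option String) (out : String) : Decidable (Spec_infer_node_type label out) := by unfold Spec_infer_node_type; infer_instance

-- ===== CLAIM (what is proved, stated in full; the proofs are below) =====
def Claim_equal_infer_node_type : Prop := ∀ (label : Option String), Dom_infer_node_type label → Spec_infer_node_type label (infer_node_type label)

-- ===== LEMMAS AND PROOFS =====

-- first-match over an indexed rule list: proof-side characterisation of A's chain
def pvFirstIdx (p : String → Bool) : List (Int × String × List String) → Option Int
  | [] => none
  | e :: rest => if e.2.2.any p then some e.1 else pvFirstIdx p rest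

theorem pv_flatMap_filter {α β : Type} (p : β → Bool) (f : α → List β) :
    ∀ (l : List α), (l.flatMap f).filter p = l.flatMap (fun a => (f a).filter p)
  | [] => rfl
  | a :: l => by simp [List.flatMap_cons, List.filter_append, pv_flatMap_filter p f l]

theorem pv_flatMap_map {α β γ : Type} (g : β → γ) (f : α → List β) :
    ∀ (l : List α), (l.flatMap f).map g = l.flatMap (fun a => (f a).map g)
  | [] => rfl
  | a :: l => by simp [List.flatMap_cons, List.map_append, pv_flatMap_map g f l]

theorem pv_foldl_min_of_le (x : Int) : ∀ (t : List Int), (∀ y ∈ t, x ≤ y) → t.foldl min x = x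
  | [], _ => rfl
  | a :: t, h => by
      have hx : min x a = x := min_eq_left (h a (by simp))
      simp only [List.foldl_cons, hx]
      exact pv_foldl_min_of_le x t (fun y hy => h y (by simp [hy]))

theorem pv_min?_head (x : Int) (t : List Int) (h : ∀ y ∈ t, x ≤ y) :
    PySem.List.min? (x :: t) (fun y => y) = some x := by
  rw [PySem.List.min?_id_cons, pv_foldl_min_of_le x t h]

-- the keyword prefix-matches at some position of t  ⟺  keyword in t (keyword nonempty)
theorem pv_scan_any (t kw : String) (hk : kw.toList ≠ []) :
    ((PySem.List.pyRange 0 (PySem.Str.len t) 1).any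
      (fun i => PySem.Str.startswith (PySem.Str.slice t (some i) none) kw)) = PySem.Str.isIn kw t := by
  rw [Bool.eq_iff_iff]
  simp only [List.any_eq_true]
  constructor
  · rintro ⟨i, hi, hsw⟩
    rw [PySem.List.mem_pyRange_one] at hi
    rw [PySem.Str.startswith_eq, PySem.Chars.startswith_iff] at hsw
    rw [PySem.Str.toList_slice, PySem.Chars.slice_eq_listSlice,
      PySem.List.slice_from t.toList hi.1] at hsw
    rw [PySem.Str.isIn_eq]
    exact (PySem.Chars.exists_prefix_drop_iff_isIn kw.toList t.toList).mp ⟨i.toNat, hsw⟩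
  · intro hin
    rw [PySem.Str.isIn_eq] at hin
    obtain ⟨j, hp⟩ := (PySem.Chars.exists_prefix_drop_iff_isIn kw.toList t.toList).mpr hin
    have hjlt : j < t.toList.length := by
      by_contra hj
      rw [List.drop_eq_nil_of_le (by omega)] at hp
      exact hk (List.prefix_nil.mp hp)
    refine ⟨(j : Int), ?_, ?_⟩
    · rw [PySem.List.mem_pyRange_one]
      refine ⟨Int.natCast_nonneg j, ?_⟩
      simp only [PySem.Str.len_eq]
      exact_mod_cast hjlt
    · rw [PySem.Str.startswith_eq, PySem.Chars.startswith_iff,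
        PySem.Str.toList_slice, PySem.Chars.slice_eq_listSlice,
        PySem.List.slice_from t.toList (Int.natCast_nonneg j), Int.toNat_natCast]
      exact hp

-- the membership shape of the flattened priority list
theorem pv_mem_blocks (p : String → Bool) (rules : List (Int × String × List String)) (y : Int)
    (hy : y ∈ rules.flatMap (fun e => ((e.2.2.filter p).map (fun _ => e.1)))) :
    ∃ e ∈ rules, y = e.1 := by
  rw [List.mem_flatMap] at hy
  obtain ⟨e, he, hy⟩ := hy
  rw [List.mem_map] at hy
  obtain ⟨_, _, h⟩ := hy
  exact ⟨e, he, h.symm⟩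

-- min of all matched priorities = priority of the first matching rule
theorem pv_minFirst (p : String → Bool) :
    ∀ (rules : List (Int × String × List String)), rules.Pairwise (fun a b => a.1 < b.1) →
    PySem.List.min? (rules.flatMap (fun e => ((e.2.2.filter p).map (fun _ => e.1)))) (fun x => x)
      = pvFirstIdx p rules
  | [], _ => rfl
  | e :: rest, hpw => by
      rw [List.pairwise_cons] at hpw
      by_cases h : e.2.2.any p = true
      · obtain ⟨k, hk, hkt⟩ := List.any_eq_true.mp h
        cases hf : e.2.2.filter p with
        | nil =>
          have hmem : k ∈ e.2.2.filter p := List.mem_filter.mpr ⟨hk, hkt⟩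
          rw [hf] at hmem
          exact absurd hmem (List.not_mem_nil)
        | cons a l =>
          simp only [List.flatMap_cons, hf, List.map_cons, List.cons_append]
          rw [pv_min?_head]
          · simp only [pvFirstIdx]
            rw [if_pos h]
          · intro y hy
            rw [List.mem_append] at hy
            rcases hy with hy | hy
            · rw [List.mem_map] at hy; obtain ⟨_, _, h'⟩ := hy; omega
            · obtain ⟨e', he', hye⟩ := pv_mem_blocks p rest y hy
              have := hpw.1 e' he'; omega
      · have hf : e.2.2.filter p = [] := by
          rw [List.filter_eq_nil_iff]
          intro k hkmem hkt
          exact h (List.any_eq_true.mpr ⟨k, hkmem, hkt⟩)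
        simp only [List.flatMap_cons, hf, List.map_nil, List.nil_append]
        rw [pv_minFirst p rest hpw.2]
        simp only [pvFirstIdx]
        rw [if_neg h]

-- every keyword in the table is nonempty
theorem pv_keywords_ne : ∀ kp ∈ pvKeywords, kp.1.toList ≠ [] := by decide

-- a rule block, filtered and projected to its priority
theorem pv_block {p : String → Bool} (r : Int) :
    ∀ (l : List String),
    ((l.map (fun k => (k, r))).filter (fun kp => p kp.1)).map (fun kp => kp.2)
      = (l.filter p).map (fun _ => r)
  | [] => rfl
  | k :: l => by
      simp only [List.map_cons, List.filter_cons]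
      cases hp : p k
      · simpa [hp] using pv_block (p := p) r l
      · simpa [hp] using pv_block (p := p) r l

-- the matched-priority list, rewritten into per-rule blocks
theorem pv_prios (p : String → Bool) :
    ((pvKeywords.filter (fun kp => p kp.1)).map (fun kp => kp.2))
      = (PySem.List.enumerate pvRules 0).flatMap
          (fun e => ((e.2.2.filter p).map (fun _ => e.1))) := by
  unfold pvKeywords
  rw [pv_flatMap_filter, pv_flatMap_map]
  simp only [pv_block]

-- A's chain, generically: first matching rule's type label
def pvChainOf (p : String → Bool) : List (Int × String × List String) → String
  | [] => "component"
  | e :: rest => if e.2.2.any p then e.2.1 else pvChainOf p rest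

theorem pv_match_chain (p : String → Bool) :
    ∀ (rules : List (Int × String × List String)),
    (∀ e ∈ rules, (PySem.List.pyGet? pvTypes e.1).getD "component" = e.2.1) →
    (match pvFirstIdx p rules with
     | some r => (PySem.List.pyGet? pvTypes r).getD "component"
     | none => "component") = pvChainOf p rules
  | [], _ => rfl
  | e :: rest, h => by
      by_cases hc : e.2.2.any p = true
      · simp only [pvFirstIdx, pvChainOf, hc, if_true]
        exact h e (by simp)
      · simp only [pvFirstIdx, pvChainOf, hc]
        exact pv_match_chain p rest (fun e' he' => h e' (by simp [he']))

-- B's selection over the first-match index equals A's unrolled chain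
theorem pv_chain (t : String) :
    (match pvFirstIdx (fun k => PySem.Str.isIn k t) (PySem.List.enumerate pvRules 0) with
     | some p => (PySem.List.pyGet? pvTypes p).getD "component"
     | none => "component")
    = (if (["user", "usuário", "usuario", "customer", "cliente", "browser", "mobile", "frontend", "ui"]).any (fun k => PySem.Str.isIn k t) then "user"
      else if (["cdn", "cloudfront", "akamai"]).any (fun k => PySem.Str.isIn k t) then "cdn"
      else if (["waf", "firewall"]).any (fun k => PySem.Str.isIn k t) then "waf"
      else if (["load balancer", "elb", "alb", "nlb", "ingress", "reverse proxy", "proxy"]).any (fun k => PySem.Str.isIn k t) then "load_balancer"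
      else if (["dns", "route 53", "route53"]).any (fun k => PySem.Str.isIn k t) then "dns"
      else if (["api gateway", "gateway", "endpoint", "rest", "graphql"]).any (fun k => PySem.Str.isIn k t) then "api_gateway"
      else if PySem.Str.isIn "api" t then "api"
      else if (["service", "microservice", "backend", "worker", "lambda", "function", "container", "pod"]).any (fun k => PySem.Str.isIn k t) then "service"
      else if (["server", "vm", "ec2", "instance", "app server", "web server", "nginx", "apache"]).any (fun k => PySem.Str.isIn k t) then "server"
      else if (["db", "database", "rds", "dynamodb", "postgres", "mysql", "sql server", "oracle", "mongo", "redis"]).any (fun k => PySem.Str.isIn k t) then "database"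
      else if (["cache", "memcached"]).any (fun k => PySem.Str.isIn k t) then "cache"
      else if (["s3", "bucket", "storage", "blob", "files", "minio"]).any (fun k => PySem.Str.isIn k t) then "storage"
      else if (["queue", "mq", "kafka", "sqs", "pubsub", "rabbit", "event", "topic", "stream"]).any (fun k => PySem.Str.isIn k t) then "queue"
      else if (["auth", "oauth", "oidc", "sso", "iam", "identity", "cognito", "keycloak"]).any (fun k => PySem.Str.isIn k t) then "identity"
      else if (["cloudtrail", "siem", "log", "logging", "monitor", "grafana", "prometheus"]).any (fun k => PySem.Str.isIn k t) then "observability"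
      else "component") := by
  have hE : PySem.List.enumerate pvRules 0 =
      [(0, "user", ["user", "usuário", "usuario", "customer", "cliente", "browser", "mobile", "frontend", "ui"]),
       (1, "cdn", ["cdn", "cloudfront", "akamai"]),
       (2, "waf", ["waf", "firewall"]),
       (3, "load_balancer", ["load balancer", "elb", "alb", "nlb", "ingress", "reverse proxy", "proxy"]),
       (4, "dns", ["dns", "route 53", "route53"]),
       (5, "api_gateway", ["api gateway", "gateway", "endpoint", "rest", "graphql"]),
       (6, "api", ["api"]),
       (7, "service", ["service", "microservice", "backend", "worker", "lambda", "function", "container", "pod"]),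
       (8, "server", ["server", "vm", "ec2", "instance", "app server", "web server", "nginx", "apache"]),
       (9, "database", ["db", "database", "rds", "dynamodb", "postgres", "mysql", "sql server", "oracle", "mongo", "redis"]),
       (10, "cache", ["cache", "memcached"]),
       (11, "storage", ["s3", "bucket", "storage", "blob", "files", "minio"]),
       (12, "queue", ["queue", "mq", "kafka", "sqs", "pubsub", "rabbit", "event", "topic", "stream"]),
       (13, "identity", ["auth", "oauth", "oidc", "sso", "iam", "identity", "cognito", "keycloak"]),
       (14, "observability", ["cloudtrail", "siem", "log", "logging", "monitor", "grafana", "prometheus"])] := by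
    rfl
  rw [pv_match_chain _ _ (by decide), hE]
  simp only [pvChainOf]
  simp only [List.any_cons, List.any_nil, Bool.or_false]

-- ===== VERDICT (by name: the statement is the Claim_ definition above) =====
theorem infer_node_type_spec : Claim_equal_infer_node_type := by
  intro label _
  unfold Spec_infer_node_type infer_node_type infer_node_type_alt
  by_cases ht : PySem.Str.lower (PySem.Str.strip (label.getD "")) = ""
  · simp only [ht, if_pos]
  · simp only [ht, if_neg, not_false_iff]
    rw [List.filter_congr (fun kp hkp => pv_scan_any _ kp.1 (pv_keywords_ne kp hkp)),
      pv_prios (fun k => PySem.Str.isIn k (PySem.Str.lower (PySem.Str.strip (label.getD "")))),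
      pv_minFirst (fun k => PySem.Str.isIn k (PySem.Str.lower (PySem.Str.strip (label.getD ""))))
        _ (PySem.List.pairwise_lt_enumerate pvRules 0),
      pv_chain]
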